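-- pv_equiv track=rewrite | github.com/keei/stepper | python/stepper.py | convertTriggerByteIntoChars
-- ===== SOURCE A (Python) =====
-- def convertTriggerByteIntoChars(number):
-- 	"""Convert a byte into eight characters, suitable for display on a screen with a fixed width font."""
-- 	string = ''
--
-- 	for i in range(8):
-- 		if number & 1 << i: # "2 << i" basically means "Two to the power of i"
-- 			string = 'o' + string
-- 		else:
-- 			string = '.' + string
--
-- 	return string
-- ===== SOURCE B (Python) =====
-- def convertTriggerByteIntoChars(number):
-- 	"""Convert a byte into eight characters, suitable for display on a screen with a fixed width font."""
-- 	n = number & 0xFF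
-- 	return format(n, '08b').translate(str.maketrans('01', '.o'))
-- ===== Notes on version B (the rewrite author's own statement) =====
-- stated objective: idiomatic
-- what changed: B replaces the per-bit test-and-prepend loop by a mask (& 0xFF), a single binary-format call producing the 8 digits MSB-first, and a digit-to-symbol translation.
import Mathlib
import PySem

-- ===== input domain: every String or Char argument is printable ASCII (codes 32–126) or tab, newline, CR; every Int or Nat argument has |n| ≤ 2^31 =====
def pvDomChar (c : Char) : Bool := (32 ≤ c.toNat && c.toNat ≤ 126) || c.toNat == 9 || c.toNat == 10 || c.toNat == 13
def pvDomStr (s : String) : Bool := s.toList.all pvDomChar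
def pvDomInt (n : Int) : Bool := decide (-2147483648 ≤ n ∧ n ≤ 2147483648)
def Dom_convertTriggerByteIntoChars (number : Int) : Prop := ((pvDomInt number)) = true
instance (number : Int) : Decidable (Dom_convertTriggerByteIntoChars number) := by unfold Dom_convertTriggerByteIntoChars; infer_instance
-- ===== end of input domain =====

-- B: mask + binary-format + digit translation instead of A's per-bit test-and-prepend loop (idiomatic, not faster).
-- ===== PORT A =====
def convertTriggerByteIntoChars (number : Int) : String :=
  -- string = ''; for i in range(8): string = ('o' if number & 1 << i else '.') + string
  (PySem.List.pyRange 0 8 1).foldl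
    (fun string i =>
      if PySem.Int.band number ((1:Int) <<< i.toNat) ≠ 0 then "o" ++ string else "." ++ string)
    ""

-- ===== PORT B =====
def convertTriggerByteIntoChars_alt (number : Int) : String :=
  let n : Int := PySem.Int.band number 255          -- n = number & 0xFF
  let ds : List Char := PySem.Int.toBinChars n       -- format(n, 'b')  (n ≥ 0 here)
  let bits : List Char := List.replicate (8 - ds.length) '0' ++ ds   -- '08b' zero-pads to width 8
  String.ofList (bits.map (fun c => if c = '1' then 'o' else '.'))       -- translate '01' -> '.o' 

-- ===== PRECONDITION & SPEC =====
def Spec_convertTriggerByteIntoChars (number : Int) (out : String) : Prop := out = convertTriggerByteIntoChars_alt number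
instance (number : Int) (out : String) : Decidable (Spec_convertTriggerByteIntoChars number out) := by unfold Spec_convertTriggerByteIntoChars; infer_instance

-- ===== CLAIM (what is proved, stated in full; the proofs are below) =====
def Claim_equal_convertTriggerByteIntoChars : Prop := ∀ (number : Int), Dom_convertTriggerByteIntoChars number → Spec_convertTriggerByteIntoChars number (convertTriggerByteIntoChars number)

-- ===== LEMMAS AND PROOFS =====

-- low-bit extraction is unchanged by reducing mod 256
lemma nat_and_mod256 (m : Nat) (p : Nat) (hp : p < 8) : 2 ^ p &&& m = 2 ^ p &&& (m % 256) := by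
  apply Nat.eq_of_testBit_eq
  intro j
  rw [Nat.testBit_and, Nat.testBit_and, show (256:Nat) = 2^8 from rfl,
      Nat.testBit_mod_two_pow, Nat.testBit_two_pow]
  by_cases h : p = j
  · subst h; simp [show p < 8 from hp]
  · simp [h]

lemma nat_and255 (n : Nat) : n &&& 255 = n % 256 := by
  apply Nat.eq_of_testBit_eq; intro j
  rw [Nat.testBit_and, show (256:Nat) = 2^8 from rfl, Nat.testBit_mod_two_pow,
      show (255:Nat) = 2^8-1 from rfl, Nat.testBit_two_pow_sub_one]
  cases h : Nat.testBit n j <;> simp [Bool.and_comm]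

set_option maxRecDepth 8192 in
lemma nat_small_sub (s p : Nat) (hs : s < 256) (hp : p < 8) :
    (255 - s) &&& 2 ^ p = 2 ^ p - (2 ^ p &&& s) := by
  revert hp; revert hs
  exact fun hs => (by decide : ∀ s < 256, ∀ p < 8, (255 - s) &&& 2 ^ p = 2 ^ p - (2 ^ p &&& s)) s hs p

lemma band_pow_mod256 (a : Int) (p : Nat) (hp : p < 8) :
    PySem.Int.band a ((2:Int) ^ p) = PySem.Int.band (a % 256) ((2:Int) ^ p) := by
  have hppos : (0:Int) ≤ (2:Int) ^ p := by positivity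
  have htn : ((2:Int) ^ p).toNat = 2 ^ p := by
    rw [show ((2:Int) ^ p) = ((2 ^ p : Nat) : Int) by push_cast; ring]; exact Int.toNat_natCast _
  have h0 : 0 ≤ a % 256 := Int.emod_nonneg a (by norm_num)
  have h1 : a % 256 < 256 := Int.emod_lt_of_pos a (by norm_num)
  by_cases ha : 0 ≤ a
  · have hr : (a % 256).toNat = a.toNat % 256 := by omega
    simp only [PySem.Int.band, if_pos ha, if_pos hppos, if_pos h0, htn, hr]
    rw [Nat.and_comm _ (2^p), Nat.and_comm _ (2^p), ← nat_and_mod256 _ p hp]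
  · have hm : ((-a - 1).toNat : Int) = -a - 1 := by omega
    have hr : (a % 256).toNat = 255 - (-a - 1).toNat % 256 := by omega
    simp only [PySem.Int.band, if_neg ha, if_pos hppos, if_pos h0, htn, hr]
    rw [nat_and_mod256 _ p hp, nat_small_sub ((-a - 1).toNat % 256) p (by omega) hp]

lemma band255_eq_emod (a : Int) : PySem.Int.band a 255 = a % 256 := by
  by_cases ha : 0 ≤ a
  · simp only [PySem.Int.band, if_pos ha, show (0:Int) ≤ 255 by norm_num, if_pos trivial]
    rw [show ((255:Int)).toNat = 255 from rfl, nat_and255]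
    omega
  · simp only [PySem.Int.band, if_neg ha, show (0:Int) ≤ 255 by norm_num, if_true]
    rw [show ((255:Int)).toNat = 255 from rfl, Nat.and_comm, nat_and255]
    have hm : ((-a - 1).toNat : Int) = -a - 1 := by omega
    omega

lemma A_mod256 (a : Int) : convertTriggerByteIntoChars a = convertTriggerByteIntoChars (a % 256) := by
  have h := band_pow_mod256 a
  have h0 := h 0 (by norm_num); have h1 := h 1 (by norm_num)
  have h2 := h 2 (by norm_num); have h3 := h 3 (by norm_num)
  have h4 := h 4 (by norm_num); have h5 := h 5 (by norm_num)
  have h6 := h 6 (by norm_num); have h7 := h 7 (by norm_num)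
  norm_num at h0 h1 h2 h3 h4 h5 h6 h7
  simp only [convertTriggerByteIntoChars,
    show PySem.List.pyRange 0 8 1 = [0, 1, 2, 3, 4, 5, 6, 7] from rfl, List.foldl]
  rw [show (1:Int) <<< (((0:Int).toNat : Nat) : Int) = (1:Int) from by decide,
      show (1:Int) <<< (((1:Int).toNat : Nat) : Int) = (2:Int) from by decide,
      show (1:Int) <<< (((2:Int).toNat : Nat) : Int) = (4:Int) from by decide,
      show (1:Int) <<< (((3:Int).toNat : Nat) : Int) = (8:Int) from by decide,
      show (1:Int) <<< (((4:Int).toNat : Nat) : Int) = (16:Int) from by decide,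
      show (1:Int) <<< (((5:Int).toNat : Nat) : Int) = (32:Int) from by decide,
      show (1:Int) <<< (((6:Int).toNat : Nat) : Int) = (64:Int) from by decide,
      show (1:Int) <<< (((7:Int).toNat : Nat) : Int) = (128:Int) from by decide,
      h0, h1, h2, h3, h4, h5, h6, h7]

lemma B_mod256 (a : Int) : convertTriggerByteIntoChars_alt a = convertTriggerByteIntoChars_alt (a % 256) := by
  simp only [convertTriggerByteIntoChars_alt, band255_eq_emod, Int.emod_emod_of_dvd a dvd_rfl]

set_option maxRecDepth 4096 in
lemma AB_small : ∀ r : Fin 256, convertTriggerByteIntoChars (r : Int) = convertTriggerByteIntoChars_alt (r : Int) := by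
  decide

-- ===== VERDICT (by name: the statement is the Claim_ definition above) =====
theorem convertTriggerByteIntoChars_spec : Claim_equal_convertTriggerByteIntoChars := by
  intro a _
  unfold Spec_convertTriggerByteIntoChars
  rw [A_mod256 a, B_mod256 a]
  have h0 : 0 ≤ a % 256 := Int.emod_nonneg a (by norm_num)
  have h1 : a % 256 < 256 := Int.emod_lt_of_pos a (by norm_num)
  have : a % 256 = ((⟨(a % 256).toNat, by omega⟩ : Fin 256) : Int) := by simp; omega
  rw [this]
  exact AB_small _
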